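-- pv_equiv track=rewrite | github.com/reml-group/Deliberation-on-Priors | reasoning/instantiation_metaqa.py | find_possible_endpoints
-- ===== SOURCE A (Python) =====
-- def find_possible_endpoints(graph, start_node, relation) -> tuple[list[str], list[list[str]]]:
--     """ 根据起始节点和关系路径，找到可能的终点
--
--     Args:
--         graph (_type_): 每一条数据的sub_graph
--         start_node (_type_): [q_entity]
--         relation (_type_): 模型生成的关系路径
--
--     Returns:
--         tuple[list[str], list[list[str]]]: 第一个为可能的终点，第二个为对应的路径
--     """
--     endpoints = []
--     path = []
--     def dfs(graph, curr_node, relation_index, curr_path):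
--         if relation_index == len(relation):
--             endpoints.append(curr_node)
--             path.append(curr_path)
--             return
--         current_relation = relation[relation_index]
--         for neighbor, attr in graph[curr_node].items():
--             if neighbor not in curr_path:
--                 if 'relations' in attr and current_relation in attr['relations']:
--                     dfs(graph, neighbor, relation_index+1, curr_path + [neighbor])
--     for node in start_node:
--         if node in graph:
--             dfs(graph, node, 0, [node])
--     return endpoints, path
-- ===== SOURCE B (Python) =====
-- def find_possible_endpoints(graph, start_node, relation) -> tuple[list[str], list[list[str]]]:
--     # Iterative breadth-first level expansion instead of recursive DFS.
--     frontier = [[node] for node in start_node if node in graph]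
--     for label in relation:
--         new_frontier = []
--         for p in frontier:
--             for neighbor, attr in graph[p[-1]].items():
--                 if neighbor not in p and 'relations' in attr and label in attr['relations']:
--                     new_frontier.append(p + [neighbor])
--         frontier = new_frontier
--     return [p[-1] for p in frontier], frontier
-- ===== Notes on version B (the rewrite author's own statement) =====
-- stated objective: simpler
-- what changed: Replaced the recursive DFS with nonlocal accumulator lists by an iterative breadth-first level expansion: a frontier of paths is rebuilt once per relation label, and endpoints are read off as the last elements of the final frontier.
import Mathlib
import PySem

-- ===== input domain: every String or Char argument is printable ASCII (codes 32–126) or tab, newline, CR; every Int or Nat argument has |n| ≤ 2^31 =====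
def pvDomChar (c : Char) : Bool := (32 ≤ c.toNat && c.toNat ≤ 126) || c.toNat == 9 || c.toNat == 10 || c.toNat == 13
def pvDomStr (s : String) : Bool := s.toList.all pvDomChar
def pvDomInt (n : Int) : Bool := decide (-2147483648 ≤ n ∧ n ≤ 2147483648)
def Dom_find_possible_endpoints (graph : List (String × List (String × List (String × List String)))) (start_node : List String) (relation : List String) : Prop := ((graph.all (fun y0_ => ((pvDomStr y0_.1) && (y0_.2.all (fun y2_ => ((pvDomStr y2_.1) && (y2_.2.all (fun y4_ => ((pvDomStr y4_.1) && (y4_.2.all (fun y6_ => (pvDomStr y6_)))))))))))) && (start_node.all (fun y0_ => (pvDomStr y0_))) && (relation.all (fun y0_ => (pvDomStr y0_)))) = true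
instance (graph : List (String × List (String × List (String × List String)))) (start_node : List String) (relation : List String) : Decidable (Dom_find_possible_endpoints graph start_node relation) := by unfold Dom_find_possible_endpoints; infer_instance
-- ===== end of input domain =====

-- B replaces A's recursive DFS (with nonlocal accumulator lists) by an iterative
-- breadth-first level expansion of a frontier of paths: same return value, different decomposition.

-- ===== PORT A =====
-- graph[curr_node].items(), with Python-dict semantics for the association lists; on a missing
-- key Python raises KeyError — Pre_ excludes those inputs, the port leaves the accumulator unchanged.
def pvAdjA (graph : List (String × List (String × List (String × List String)))) (k : String) : List (String × List (String × List String)) :=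
  (PySem.Dict.ofList ((PySem.Dict.ofList graph).getD k [])).items

-- 'relations' in attr and current_relation in attr['relations']
def pvMatchA (attr : List (String × List String)) (r : String) : Bool :=
  (PySem.Dict.ofList attr).contains "relations" &&
  ((PySem.Dict.ofList attr).getD "relations" []).contains r

-- the inner dfs: recursion over the remaining relation suffix, loop over graph[curr_node].items()
def pvDfsA (graph : List (String × List (String × List (String × List String))))
    (curr_node : String) (rem : List String) (curr_path : List String)
    (acc : List String × List (List String)) : List String × List (List String) :=
  match rem with
  | [] => (acc.1 ++ [curr_node], acc.2 ++ [curr_path])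
  | r :: rest =>
      (pvAdjA graph curr_node).foldl
        (fun acc2 na =>
          if !curr_path.contains na.1 && pvMatchA na.2 r then
            pvDfsA graph na.1 rest (curr_path ++ [na.1]) acc2
          else acc2)
        acc
termination_by rem.length

def find_possible_endpoints (graph : List (String × List (String × List (String × List String)))) (start_node : List String) (relation : List String) : List String × List (List String) :=
  start_node.foldl
    (fun acc node => if (PySem.Dict.ofList graph).contains node then pvDfsA graph node relation [node] acc else acc)
    ([], [])

-- ===== PORT B =====
-- iterative level expansion: frontier of paths rebuilt once per relation label
def find_possible_endpoints_alt (graph : List (String × List (String × List (String × List String)))) (start_node : List String) (relation : List String) : List String × List (List String) :=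
  let frontier0 := (start_node.filter (fun n => (PySem.Dict.ofList graph).contains n)).map (fun n => [n])
  let frontier := relation.foldl
    (fun fr label =>
      fr.flatMap (fun p =>
        ((PySem.Dict.ofList ((PySem.Dict.ofList graph).getD (p.getLastD "") [])).items.filter
            (fun na => !p.contains na.1 &&
                       (PySem.Dict.ofList na.2).contains "relations" &&
                       ((PySem.Dict.ofList na.2).getD "relations" []).contains label)).map
          (fun na => p ++ [na.1])))
    frontier0
  (frontier.map (fun p => p.getLastD ""), frontier)

-- ===== PRECONDITION & SPEC =====
-- Pre_ excludes graphs with a dangling edge that matches a non-final relation label: its target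
-- is not a graph key, so following it raises KeyError in both A and B. The condition ignores
-- reachability (a conservative closed form), so a few returning inputs are excluded too.
def Pre_find_possible_endpoints (graph : List (String × List (String × List (String × List String)))) (start_node : List String) (relation : List String) : Prop :=
  ∀ x ∈ graph, ∀ y ∈ (PySem.Dict.ofList x.2).items,
    relation.dropLast.any (fun r => ((PySem.Dict.ofList y.2).getD "relations" []).contains r) = true →
    (PySem.Dict.ofList graph).contains y.1 = true
instance (graph : List (String × List (String × List (String × List String)))) (start_node : List String) (relation : List String) : Decidable (Pre_find_possible_endpoints graph start_node relation) := by unfold Pre_find_possible_endpoints; infer_instance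

def pvWitness_find_possible_endpoints : (List (String × List (String × List (String × List String)))) × List String × List String :=
  ([("a", [("b", [("relations", ["r"])])]), ("b", [])], ["a"], ["r"])

def Spec_find_possible_endpoints (graph : List (String × List (String × List (String × List String)))) (start_node : List String) (relation : List String) (out : List String × List (List String)) : Prop := out = find_possible_endpoints_alt graph start_node relation
instance (graph : List (String × List (String × List (String × List String)))) (start_node : List String) (relation : List String) (out : List String × List (List String)) : Decidable (Spec_find_possible_endpoints graph start_node relation out) := by unfold Spec_find_possible_endpoints; infer_instance

-- ===== CLAIM (what is proved, stated in full; the proofs are below) =====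
def Claim_equal_find_possible_endpoints : Prop := ∀ (graph : List (String × List (String × List (String × List String)))) (start_node : List String) (relation : List String), Dom_find_possible_endpoints graph start_node relation → Pre_find_possible_endpoints graph start_node relation → Spec_find_possible_endpoints graph start_node relation (find_possible_endpoints graph start_node relation)

-- ===== LEMMAS AND PROOFS =====

-- the tree of (endpoint, path) pairs both programs enumerate, in enumeration order
def pvPathsE (graph : List (String × List (String × List (String × List String)))) :
    List String → String → List String → List (String × List String)
  | [], node, p => [(node, p)]
  | r :: rest, node, p =>
      (pvAdjA graph node).flatMap (fun na =>
        if !p.contains na.1 && pvMatchA na.2 r then pvPathsE graph rest na.1 (p ++ [na.1]) else [])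

theorem pvFilterFlatMap {α β : Type} (l : List α) (c : α → Bool) (g : α → List β) :
    (l.filter c).flatMap g = l.flatMap (fun x => if c x then g x else []) := by
  induction l with
  | nil => simp
  | cons a t ih => by_cases h : c a <;> simp [h, ih]

-- every enumerated path ends in its endpoint (given the seed path does)
theorem pvPathsE_last (graph : List (String × List (String × List (String × List String))))
    (rem : List String) : ∀ (node : String) (p : List String), p.getLastD "" = node →
    ∀ x ∈ pvPathsE graph rem node p, x.2.getLastD "" = x.1 := by
  induction rem with
  | nil =>
    intro node p hp x hx
    simp only [pvPathsE, List.mem_singleton] at hx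
    subst hx; exact hp
  | cons r rest ih =>
    intro node p _ x hx
    simp only [pvPathsE, List.mem_flatMap] at hx
    obtain ⟨na, _, hx⟩ := hx
    by_cases h : (!p.contains na.1 && pvMatchA na.2 r) = true
    · rw [if_pos h] at hx
      exact ih na.1 (p ++ [na.1]) List.getLastD_concat x hx
    · rw [if_neg h] at hx
      simp at hx

-- A's dfs appends exactly the enumeration of pvPathsE to its accumulator
theorem pvDfsA_eq (graph : List (String × List (String × List (String × List String))))
    (rem : List String) : ∀ (node : String) (p : List String) (acc : List String × List (List String)),
    pvDfsA graph node rem p acc =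
      (acc.1 ++ (pvPathsE graph rem node p).map Prod.fst,
       acc.2 ++ (pvPathsE graph rem node p).map Prod.snd) := by
  induction rem with
  | nil => intro node p acc; simp [pvDfsA, pvPathsE]
  | cons r rest ih =>
    intro node p acc
    rw [pvDfsA]
    show (pvAdjA graph node).foldl _ acc = _
    rw [pvPathsE]
    induction pvAdjA graph node generalizing acc with
    | nil => simp
    | cons na tl ihL =>
      simp only [List.foldl_cons, List.flatMap_cons]
      by_cases h : (!p.contains na.1 && pvMatchA na.2 r) = true
      · rw [if_pos h, if_pos h, ih, ihL]
        simp [List.append_assoc]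
      · rw [if_neg h, if_neg h, ihL]
        simp

-- B's level expansion computes the same enumeration, frontier-wise
theorem pvFoldB_eq (graph : List (String × List (String × List (String × List String))))
    (rem : List String) : ∀ (F : List (List String)),
    rem.foldl
      (fun fr label =>
        fr.flatMap (fun p =>
          ((PySem.Dict.ofList ((PySem.Dict.ofList graph).getD (p.getLastD "") [])).items.filter
              (fun na => !p.contains na.1 &&
                         (PySem.Dict.ofList na.2).contains "relations" &&
                         ((PySem.Dict.ofList na.2).getD "relations" []).contains label)).map
            (fun na => p ++ [na.1])))
      F
    = F.flatMap (fun p => (pvPathsE graph rem (p.getLastD "") p).map Prod.snd) := by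
  induction rem with
  | nil => intro F; simp [pvPathsE]
  | cons r rest ih =>
    intro F
    rw [List.foldl_cons, ih, List.flatMap_assoc]
    apply List.flatMap_congr
    intro p _
    rw [List.flatMap_map, pvFilterFlatMap, pvPathsE, List.map_flatMap]
    simp only [List.getLastD_concat, pvAdjA, pvMatchA, apply_ite (List.map Prod.snd),
      List.map_nil, Bool.and_assoc]

-- A's top-level loop over the start nodes
theorem pvTopA (graph : List (String × List (String × List (String × List String))))
    (relation : List String) (sn : List String) :
    ∀ (acc : List String × List (List String)),
    sn.foldl (fun acc node => if (PySem.Dict.ofList graph).contains node then pvDfsA graph node relation [node] acc else acc) acc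
    = (acc.1 ++ (sn.filter (fun n => (PySem.Dict.ofList graph).contains n)).flatMap (fun n => (pvPathsE graph relation n [n]).map Prod.fst),
       acc.2 ++ (sn.filter (fun n => (PySem.Dict.ofList graph).contains n)).flatMap (fun n => (pvPathsE graph relation n [n]).map Prod.snd)) := by
  induction sn with
  | nil => intro acc; simp
  | cons a t ih =>
    intro acc
    by_cases h : (PySem.Dict.ofList graph).contains a = true
    · simp only [List.foldl_cons, List.filter_cons, h, if_pos, List.flatMap_cons]
      rw [pvDfsA_eq, ih]
      simp [List.append_assoc]
    · simp only [List.foldl_cons, List.filter_cons, h]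
      rw [ih]
      simp

-- ===== VERDICT (by name: the statement is the Claim_ definition above) =====
theorem find_possible_endpoints_spec : Claim_equal_find_possible_endpoints := by
  intro graph start_node relation _ _
  unfold Spec_find_possible_endpoints find_possible_endpoints find_possible_endpoints_alt
  rw [pvTopA]
  simp only [pvFoldB_eq graph, List.flatMap_map, List.getLastD_cons, List.getLastD_nil,
    List.nil_append]
  refine Prod.ext ?_ rfl
  rw [List.map_flatMap]
  apply List.flatMap_congr
  intro n hn
  rw [List.map_map]
  apply List.map_congr_left
  intro x hx
  exact (pvPathsE_last graph relation n [n] rfl x hx).symm
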